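/- GENERATED by farm/mkstatement.py from design/units.split.tsv — do not edit.
   THE SPLIT of the proof unit `vorbis_finish_frame` into `vorbis_finish_frame.1`, `vorbis_finish_frame.2`, `vorbis_finish_frame.3`, `vorbis_finish_frame.4`, `vorbis_finish_frame.5`, `vorbis_finish_frame.COMPOSITION`: the children's statements give the parent's
   UNCHANGED statement (so nothing above the parent — callers, compositions — is touched by the split). -/
import Vorbis.Spec.Units.vorbis_finish_frame
import Vorbis.Spec.Units.vorbis_finish_frame_1
import Vorbis.Spec.Units.vorbis_finish_frame_2
import Vorbis.Spec.Units.vorbis_finish_frame_3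
import Vorbis.Spec.Units.vorbis_finish_frame_4
import Vorbis.Spec.Units.vorbis_finish_frame_5
import Vorbis.Spec.Units.vorbis_finish_frame_COMPOSITION
namespace Vorbis.Spec.Splits
open X86 X86.User Asan

/-- The segments of the split function `vorbis_finish_frame` and their composition prove its contract. -/
theorem vorbis_finish_frame
    (h_vorbis_finish_frame_1 : Vorbis.Spec.vorbis_finish_frame_1.Statement)
    (h_vorbis_finish_frame_2 : Vorbis.Spec.vorbis_finish_frame_2.Statement)
    (h_vorbis_finish_frame_3 : Vorbis.Spec.vorbis_finish_frame_3.Statement)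
    (h_vorbis_finish_frame_4 : Vorbis.Spec.vorbis_finish_frame_4.Statement)
    (h_vorbis_finish_frame_5 : Vorbis.Spec.vorbis_finish_frame_5.Statement)
    (h_vorbis_finish_frame_COMPOSITION : Vorbis.Spec.vorbis_finish_frame_COMPOSITION.Statement) :
    Vorbis.Spec.vorbis_finish_frame.Statement := by
  intro Lay _hLay μ _hμ u₀ _hcode _h_asan_load4_noabort _h_get_window _h_asan_load8_noabort _h_asan_store4_noabort
  exact h_vorbis_finish_frame_COMPOSITION Lay _hLay μ _hμ u₀
    (h_vorbis_finish_frame_1 Lay _hLay μ _hμ u₀ _hcode _h_asan_load4_noabort _h_get_window)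
    (h_vorbis_finish_frame_2 Lay _hLay μ _hμ u₀ _hcode _h_asan_load4_noabort _h_asan_load8_noabort)
    (h_vorbis_finish_frame_3 Lay _hLay μ _hμ u₀ _hcode _h_asan_load4_noabort)
    (h_vorbis_finish_frame_4 Lay _hLay μ _hμ u₀ _hcode _h_asan_load4_noabort _h_asan_load8_noabort _h_asan_store4_noabort)
    (h_vorbis_finish_frame_5 Lay _hLay μ _hμ u₀ _hcode _h_asan_load4_noabort)

end Vorbis.Spec.Splits
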